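-- pv_equiv track=rewrite | github.com/pedroth/python_experiments | Test/dailyCodingProblem/DailyCodingProblem#35.py | order_symbols
-- ===== SOURCE A (Python) =====
-- def swap(x, i, j):
--     assert i >= 0 and i < len(x) and j >= 0 and j < len(x)
--     t = x[i]
--     x[i] = x[j]
--     x[j] = t
--
-- def order_symbols(x, symbols):
--     assert bool(symbols)
--     initial_index = []
--     symbols_histogram = []
--     symbol2index = {}
--     already_fixed = []
--
--     for i in range(len(symbols)):
--         symbol2index[symbols[i]] = i
--         initial_index.append(0)
--         symbols_histogram.append(0)
--
--     for i in x:
--         symbols_histogram[symbol2index[i]] += 1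
--         already_fixed.append(False)
--
--     for i in range(1, len(symbols)):
--         initial_index[i] = symbols_histogram[i - 1] + initial_index[i - 1]
--
--     for i in range(len(x)):
--         if not already_fixed[i]:
--             while True:
--                 s = x[i]
--                 j = initial_index[symbol2index[s]]
--                 already_fixed[j] = True
--                 swap(x, i, j)
--                 initial_index[symbol2index[s]] += 1
--                 if i == j:
--                     break
--     return x
-- ===== SOURCE B (Python) =====
-- def order_symbols(x, symbols):
--     assert bool(symbols)
--     symbol2index = {}
--     for i in range(len(symbols)):
--         symbol2index[symbols[i]] = i
--     histogram = [0] * len(symbols)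
--     for v in x:
--         histogram[symbol2index[v]] += 1
--     result = []
--     for i in range(len(symbols)):
--         result.extend([symbols[i]] * histogram[i])
--     x[:] = result
--     return x
-- ===== Notes on version B (the rewrite author's own statement) =====
-- stated objective: simpler
-- what changed: B replaces A's in-place cyclic-swap placement (with initial_index pointers and an already_fixed array) by a plain counting sort: build the histogram through symbol2index, then emit each symbol repeated its count in symbol order and assign it back with x[:] = result.
import Mathlib
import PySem

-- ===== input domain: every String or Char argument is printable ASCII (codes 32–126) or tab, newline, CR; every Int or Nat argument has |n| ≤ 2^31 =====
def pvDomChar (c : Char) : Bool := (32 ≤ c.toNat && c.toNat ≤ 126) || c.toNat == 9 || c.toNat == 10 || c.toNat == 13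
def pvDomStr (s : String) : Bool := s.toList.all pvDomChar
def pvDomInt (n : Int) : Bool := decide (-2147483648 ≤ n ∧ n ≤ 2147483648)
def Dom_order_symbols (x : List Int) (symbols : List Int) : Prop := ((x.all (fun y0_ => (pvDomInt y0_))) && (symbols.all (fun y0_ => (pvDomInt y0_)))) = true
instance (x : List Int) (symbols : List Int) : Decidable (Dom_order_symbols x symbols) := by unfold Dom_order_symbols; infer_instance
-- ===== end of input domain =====

-- B replaces A's cyclic-swap in-place placement by directly emitting each symbol `histogram` times
-- in symbol order (objective: simpler).  Both Pythons mutate x in place and return it; the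
-- equivalence proved here is about the RETURN value (B performs the same final mutation x[:] = result).

-- ===== PORT A =====
-- Python helper 'swap(x, i, j)' (indices are in range whenever A reaches a swap on a Pre_ input).
def pySwap (xs : List Int) (i j : Nat) : List Int :=
  (xs.set i (xs.getD j 0)).set j (xs.getD i 0)

-- the 'while True' cycle-placement loop; fuel only makes the recursion total (on Pre_ inputs the
-- Python loop breaks within len(x)+1 iterations, and placeA passes fuel len(x)+1)
def cycleA (d : PySem.Dict Int Nat) (i : Nat) :
    Nat → List Int × List Nat × List Bool → List Int × List Nat × List Bool
  | 0, st => st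
  | fuel+1, (xs, ii, fixed) =>
    let s := xs.getD i 0
    let k := (d.get? s).getD 0
    let j := ii.getD k 0
    let fixed' := fixed.set j true
    let xs' := pySwap xs i j
    let ii' := ii.set k (ii.getD k 0 + 1)
    if i = j then (xs', ii', fixed') else cycleA d i fuel (xs', ii', fixed')

-- first loop: symbol2index[symbols[i]] = i; initial_index.append(0); symbols_histogram.append(0)
def buildA (symbols : List Int) : PySem.Dict Int Nat × List Nat × List Nat :=
  (List.range symbols.length).foldl
    (fun (st : PySem.Dict Int Nat × List Nat × List Nat) i =>
      (st.1.insert (symbols.getD i 0) i, st.2.1 ++ [0], st.2.2 ++ [0]))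
    (PySem.Dict.empty, [], [])

-- second loop: symbols_histogram[symbol2index[i]] += 1; already_fixed.append(False)
def countA (d : PySem.Dict Int Nat) (h0 : List Nat) (x : List Int) : List Nat × List Bool :=
  x.foldl
    (fun (st : List Nat × List Bool) v =>
      (st.1.set ((d.get? v).getD 0) (st.1.getD ((d.get? v).getD 0) 0 + 1), st.2 ++ [false]))
    (h0, [])

-- third loop: for i in range(1, len(symbols)): initial_index[i] = hist[i-1] + initial_index[i-1]
def prefixA (hist ii0 : List Nat) (m : Nat) : List Nat :=
  (List.range' 1 (m-1)).foldl
    (fun ii i => ii.set i (hist.getD (i-1) 0 + ii.getD (i-1) 0)) ii0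

-- fourth loop: the in-place cyclic placement
def placeA (d : PySem.Dict Int Nat) (n : Nat) (st : List Int × List Nat × List Bool) :
    List Int × List Nat × List Bool :=
  (List.range n).foldl
    (fun st i => if st.2.2.getD i false = false then cycleA d i (n+1) st else st) st

def order_symbols (x : List Int) (symbols : List Int) : List Int :=
  let t := buildA symbols
  let hf := countA t.1 t.2.2 x
  let ii := prefixA hf.1 t.2.1 symbols.length
  (placeA t.1 x.length (x, ii, hf.2)).1

-- ===== PORT B =====
def order_symbols_alt (x : List Int) (symbols : List Int) : List Int :=
  let m := symbols.length
  let d := (List.range m).foldl (fun d i => d.insert (symbols.getD i 0) i)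
    (PySem.Dict.empty : PySem.Dict Int Nat)
  let hist := x.foldl
    (fun (h : List Nat) v => h.set ((d.get? v).getD 0) (h.getD ((d.get? v).getD 0) 0 + 1))
    (List.replicate m 0)
  (List.range m).foldl
    (fun acc i => acc ++ List.replicate (hist.getD i 0) (symbols.getD i 0)) []

-- ===== PRECONDITION & SPEC =====
-- Pre_ excludes exactly the inputs on which Python A raises: empty symbols (the assert fails with
-- AssertionError) and lists x containing a value not present in symbols (KeyError in symbol2index).
def Pre_order_symbols (x : List Int) (symbols : List Int) : Prop :=
  symbols ≠ [] ∧ ∀ v ∈ x, v ∈ symbols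
instance (x : List Int) (symbols : List Int) : Decidable (Pre_order_symbols x symbols) := by
  unfold Pre_order_symbols; infer_instance

def pvWitness_order_symbols : List Int × List Int := ([1, 0, 2, 1, 0], [0, 1, 2])

def Spec_order_symbols (x : List Int) (symbols : List Int) (out : List Int) : Prop :=
  out = order_symbols_alt x symbols
instance (x : List Int) (symbols : List Int) (out : List Int) :
    Decidable (Spec_order_symbols x symbols out) := by unfold Spec_order_symbols; infer_instance

-- ===== CLAIM (what is proved, stated in full; the proofs are below) =====
def Claim_equal_order_symbols : Prop := ∀ (x : List Int) (symbols : List Int),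
  Dom_order_symbols x symbols → Pre_order_symbols x symbols →
  Spec_order_symbols x symbols (order_symbols x symbols)

-- ===== LEMMAS AND PROOFS =====

-- ---- small list lemmas ----
theorem getD_set_eq {α : Type} (l : List α) (i : Nat) (a d : α) (h : i < l.length) :
    (l.set i a).getD i d = a := by
  simp [List.getD_eq_getElem?_getD, h]

theorem getD_set_ne {α : Type} (l : List α) {i j : Nat} (a : α) (d : α) (h : j ≠ i) :
    (l.set i a).getD j d = l.getD j d := by
  simp [List.getD_eq_getElem?_getD, List.getElem?_set, Ne.symm h]

theorem getD_replicate {α : Type} (n i : Nat) (a d : α) (h : i < n) :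
    (List.replicate n a).getD i d = a := by
  simp [List.getD_eq_getElem?_getD, h]

theorem getD_replicate_any {α : Type} (n i : Nat) (a : α) :
    (List.replicate n a).getD i a = a := by
  rcases Nat.lt_or_ge i n with h | h
  · exact getD_replicate n i a a h
  · simp [List.getD_eq_getElem?_getD, List.getElem?_eq_none (l := List.replicate n a) (by simpa using h)]

theorem countP_eq_sum {α : Type} (p : α → Bool) (d : α) (l : List α) :
    l.countP p = ∑ q ∈ Finset.range l.length, if p (l.getD q d) then 1 else 0 := by
  induction l with
  | nil => simp
  | cons v l ih =>
    rw [List.countP_cons, List.length_cons,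
      Finset.sum_range_succ' (fun q => if p ((v::l).getD q d) then 1 else 0)]
    simp only [List.getD_cons_succ, List.getD_cons_zero]
    rw [ih]

theorem count_false_pos (l : List Bool) (p : Nat) (hp : p < l.length)
    (h : l.getD p false = false) : 0 < l.count false := by
  rw [List.getD_eq_getElem l false hp] at h
  exact List.count_pos_iff.mpr (h ▸ l.getElem_mem hp)

theorem count_false_set (l : List Bool) (j : Nat) (hj : j < l.length)
    (h : l.getD j false = false) : (l.set j true).count false + 1 = l.count false := by
  induction l generalizing j with
  | nil => simp at hj
  | cons b l ih =>
    cases j with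
    | zero =>
      simp only [List.getD_cons_zero] at h
      subst h
      simp [List.count_cons]
    | succ j =>
      simp only [List.getD_cons_succ] at h
      have := ih j (by simpa using hj) h
      simp only [List.set_cons_succ, List.count_cons] at *
      omega

-- ---- the shared symbol2index dictionary and derived key/count/start functions ----
def dictOf (symbols : List Int) : PySem.Dict Int Nat :=
  (List.range symbols.length).foldl (fun d i => d.insert (symbols.getD i 0) i)
    (PySem.Dict.empty : PySem.Dict Int Nat)

def keyF (symbols : List Int) (v : Int) : Nat := (((dictOf symbols).get? v).getD 0)

def cntF (x symbols : List Int) (k : Nat) : Nat := x.countP (fun v => keyF symbols v == k)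

def startF (x symbols : List Int) (k : Nat) : Nat := ∑ k' ∈ Finset.range k, cntF x symbols k'

-- the common value both ports compute: each symbol repeated its multiplicity, in symbol order
def FL (x symbols : List Int) : List Int :=
  ((List.range symbols.length).map
    (fun k => List.replicate (cntF x symbols k) (symbols.getD k 0))).flatten

theorem dict_sound (symbols : List Int) :
    ∀ (M : Nat) (v : Int) (k : Nat),
      (((List.range M).foldl (fun d i => d.insert (symbols.getD i 0) i)
        (PySem.Dict.empty : PySem.Dict Int Nat)).get? v) = some k →
      k < M ∧ symbols.getD k 0 = v := by
  intro M
  induction M with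
  | zero => intro v k h; simp [PySem.Dict.get?_empty] at h
  | succ M ih =>
    intro v k h
    rw [List.range_succ, List.foldl_append] at h
    simp only [List.foldl_cons, List.foldl_nil] at h
    rw [PySem.Dict.get?_insert] at h
    split at h
    · rename_i hv
      cases h
      exact ⟨Nat.lt_succ_self M, hv.symm⟩
    · have := ih v k h
      exact ⟨Nat.lt_succ_of_lt this.1, this.2⟩

theorem dict_complete (symbols : List Int) :
    ∀ (M : Nat) (i : Nat), i < M →
      (((List.range M).foldl (fun d i => d.insert (symbols.getD i 0) i)
        (PySem.Dict.empty : PySem.Dict Int Nat)).get? (symbols.getD i 0)).isSome := by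
  intro M
  induction M with
  | zero => intro i h; omega
  | succ M ih =>
    intro i h
    rw [List.range_succ, List.foldl_append]
    simp only [List.foldl_cons, List.foldl_nil]
    rw [PySem.Dict.get?_insert]
    split
    · simp
    · rename_i hne
      rcases Nat.lt_or_ge i M with hi | hi
      · exact ih i hi
      · have : i = M := by omega
        subst this
        exact absurd rfl hne

theorem keyF_spec (symbols : List Int) (v : Int) (hv : v ∈ symbols) :
    keyF symbols v < symbols.length ∧ symbols.getD (keyF symbols v) 0 = v := by
  obtain ⟨i, hi, hvi⟩ := List.mem_iff_getElem.mp hv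
  have hD : symbols.getD i 0 = v := by rw [List.getD_eq_getElem symbols 0 hi]; exact hvi
  have hsome := dict_complete symbols symbols.length i hi
  rw [hD] at hsome
  obtain ⟨k, hk⟩ := Option.isSome_iff_exists.mp hsome
  have := dict_sound symbols symbols.length v k hk
  unfold keyF dictOf
  rw [hk]
  exact ⟨this.1, this.2⟩

theorem cnt_pos_key (x symbols : List Int) (hpre : ∀ v ∈ x, v ∈ symbols) (k : Nat)
    (h : 0 < cntF x symbols k) : keyF symbols (symbols.getD k 0) = k := by
  obtain ⟨v, hv, hkv⟩ := List.countP_pos_iff.mp h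
  have hkv' : keyF symbols v = k := by simpa using hkv
  have := (keyF_spec symbols v (hpre v hv)).2
  rw [hkv'] at this
  rw [this, hkv']

-- ---- start function facts ----
theorem startF_succ (x symbols : List Int) (k : Nat) :
    startF x symbols (k+1) = startF x symbols k + cntF x symbols k :=
  Finset.sum_range_succ _ _

theorem startF_mono (x symbols : List Int) {k k' : Nat} (h : k ≤ k') :
    startF x symbols k ≤ startF x symbols k' := by
  unfold startF
  exact Finset.sum_le_sum_of_subset
    (fun a ha => Finset.mem_range.mpr (lt_of_lt_of_le (Finset.mem_range.mp ha) h))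

theorem startF_top (x symbols : List Int) (hpre : ∀ v ∈ x, v ∈ symbols) :
    startF x symbols symbols.length = x.length := by
  unfold startF cntF
  induction x with
  | nil => simp
  | cons v l ih =>
    have hv := (keyF_spec symbols v (hpre v List.mem_cons_self)).1
    have ihl := ih (fun w hw => hpre w (List.mem_cons_of_mem v hw))
    have hone : (∑ k' ∈ Finset.range symbols.length,
        if (keyF symbols v == k') = true then 1 else 0) = 1 := by
      have h1 : ∀ k' ∈ Finset.range symbols.length,
          (if (keyF symbols v == k') = true then (1:ℕ) else 0)
          = if k' = keyF symbols v then (fun _ => (1:ℕ)) k' else 0 := by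
        intro k' _
        rcases eq_or_ne k' (keyF symbols v) with h | h
        · simp [h]
        · simp [h, (Ne.symm h)]
      rw [Finset.sum_congr rfl h1,
        Finset.sum_ite_eq' (Finset.range symbols.length) (keyF symbols v) (fun _ => 1)]
      simp [hv]
    simp only [List.countP_cons]
    rw [Finset.sum_add_distrib, ihl, hone]
    simp

-- ---- FL facts ----
theorem FL_aux_length (x symbols : List Int) (M : Nat) :
    (((List.range M).map
      (fun k => List.replicate (cntF x symbols k) (symbols.getD k 0))).flatten).length
      = startF x symbols M := by
  induction M with
  | zero => simp [startF]
  | succ M ih =>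
    rw [List.range_succ, List.map_append, List.flatten_append, List.length_append, ih,
      startF_succ]
    simp

theorem FL_length (x symbols : List Int) (hpre : ∀ v ∈ x, v ∈ symbols) :
    (FL x symbols).length = x.length := by
  unfold FL; rw [FL_aux_length, startF_top x symbols hpre]

theorem FL_aux_getD (x symbols : List Int) (M : Nat) :
    ∀ k < M, ∀ off < cntF x symbols k,
      (((List.range M).map
        (fun kk => List.replicate (cntF x symbols kk) (symbols.getD kk 0))).flatten).getD
        (startF x symbols k + off) 0 = symbols.getD k 0 := by
  induction M with
  | zero => intro k hk; omega
  | succ M ih =>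
    intro k hk off hoff
    rw [List.range_succ, List.map_append, List.flatten_append]
    rcases Nat.lt_or_ge k M with hkM | hkM
    · rw [List.getD_append]
      · exact ih k hkM off hoff
      · rw [FL_aux_length]
        calc startF x symbols k + off < startF x symbols (k+1) := by
              rw [startF_succ]; omega
          _ ≤ startF x symbols M := startF_mono x symbols hkM
    · have : k = M := by omega
      subst this
      rw [List.getD_append_right]
      · rw [FL_aux_length]
        simp only [List.map_cons, List.map_nil, List.flatten_cons, List.flatten_nil,
          List.append_nil]
        rw [Nat.add_sub_cancel_left]
        exact getD_replicate _ _ _ _ hoff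
      · rw [FL_aux_length]; omega

theorem FL_getD (x symbols : List Int) (k : Nat) (hk : k < symbols.length)
    (off : Nat) (hoff : off < cntF x symbols k) :
    (FL x symbols).getD (startF x symbols k + off) 0 = symbols.getD k 0 :=
  FL_aux_getD x symbols symbols.length k hk off hoff

theorem hist_fold (symbols : List Int) (l : List Int) :
    ∀ (h0 : List Nat), (∀ v ∈ l, keyF symbols v < h0.length) →
      (l.foldl (fun (h : List Nat) v =>
          h.set (((dictOf symbols).get? v).getD 0)
            (h.getD (((dictOf symbols).get? v).getD 0) 0 + 1)) h0).length = h0.length ∧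
      ∀ k : Nat, (l.foldl (fun (h : List Nat) v =>
          h.set (((dictOf symbols).get? v).getD 0)
            (h.getD (((dictOf symbols).get? v).getD 0) 0 + 1)) h0).getD k 0
        = h0.getD k 0 + l.countP (fun v => keyF symbols v == k) := by
  induction l with
  | nil => intro h0 _; simp
  | cons v l ih =>
    intro h0 hkeys
    have hkv : keyF symbols v < h0.length := hkeys v List.mem_cons_self
    simp only [List.foldl_cons]
    set h1 := h0.set (((dictOf symbols).get? v).getD 0)
      (h0.getD (((dictOf symbols).get? v).getD 0) 0 + 1) with hh1
    have hlen1 : h1.length = h0.length := by simp [hh1]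
    obtain ⟨hlen, hget⟩ := ih h1 (fun w hw => hlen1 ▸ hkeys w (List.mem_cons_of_mem v hw))
    refine ⟨by rw [hlen, hlen1], fun k => ?_⟩
    rw [hget k, List.countP_cons]
    by_cases hvk : keyF symbols v = k
    · have : ((dictOf symbols).get? v).getD 0 = k := hvk
      rw [hh1, this, getD_set_eq h0 k _ 0 (hvk ▸ hkv)]
      simp [hvk]
      omega
    · have : h1.getD k 0 = h0.getD k 0 := by
        rw [hh1]; exact getD_set_ne h0 _ 0 (fun h => hvk (h.symm))
      rw [this]
      simp [hvk]

-- ---- characterisation of port B ----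
theorem foldl_append_map {α β : Type} (l : List β) (g : β → List α) :
    ∀ acc : List α, l.foldl (fun a i => a ++ g i) acc = acc ++ (l.map g).flatten := by
  induction l with
  | nil => intro acc; simp
  | cons b l ih => intro acc; simp [ih]

theorem altB_eq (x symbols : List Int) (hpre : ∀ v ∈ x, v ∈ symbols) :
    order_symbols_alt x symbols = FL x symbols := by
  have hkeys : ∀ v ∈ x, keyF symbols v < (List.replicate symbols.length (0:Nat)).length := by
    intro v hv
    simpa using (keyF_spec symbols v (hpre v hv)).1
  obtain ⟨hlen, hget⟩ := hist_fold symbols x (List.replicate symbols.length 0) hkeys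
  unfold dictOf at hget
  simp only [order_symbols_alt]
  rw [foldl_append_map]
  unfold FL
  rw [List.nil_append]
  congr 1
  apply List.map_congr_left
  intro i hi
  have him : i < symbols.length := by simpa using hi
  rw [hget i, getD_replicate _ _ _ _ him, Nat.zero_add]
  rfl

theorem pySwap_length (l : List Int) (i j : Nat) : (pySwap l i j).length = l.length := by
  simp [pySwap]

theorem pySwap_perm (l : List Int) (i j : Nat) (hi : i < l.length) (hj : j < l.length) :
    (pySwap l i j).Perm l := by
  unfold pySwap
  rw [List.getD_eq_getElem l 0 hj, List.getD_eq_getElem l 0 hi]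
  exact List.set_set_perm hi hj

theorem pySwap_getD (l : List Int) (i j p : Nat) (hi : i < l.length) (hj : j < l.length) :
    (pySwap l i j).getD p 0 =
      if p = j then l.getD i 0 else if p = i then l.getD j 0 else l.getD p 0 := by
  unfold pySwap
  rcases eq_or_ne p j with hpj | hpj
  · subst hpj
    rw [getD_set_eq _ _ _ _ (by simpa using hj), if_pos rfl]
  · rw [getD_set_ne _ _ _ hpj, if_neg hpj]
    rcases eq_or_ne p i with hpi | hpi
    · subst hpi
      rw [getD_set_eq _ _ _ _ hi, if_pos rfl]
    · rw [getD_set_ne _ _ _ hpi, if_neg hpi]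

theorem getD_set_true_mono (l : List Bool) (j p : Nat) (h : l.getD p false = true) :
    (l.set j true).getD p false = true := by
  rcases eq_or_ne p j with hpj | hpj
  · subst hpj
    rcases Nat.lt_or_ge p l.length with hp | hp
    · exact getD_set_eq _ _ _ _ (by simpa using hp)
    · rw [List.getD_eq_getElem?_getD] at h ⊢
      rw [List.getElem?_eq_none (by simpa using hp)] at h
      simp at h
  · rw [getD_set_ne _ _ _ hpj]; exact h

theorem keyF_def (symbols : List Int) (v : Int) :
    (((dictOf symbols).get? v).getD 0) = keyF symbols v := rfl

-- ---- the invariant ----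
def INV (x symbols : List Int) (st : List Int × List Nat × List Bool) : Prop :=
  st.1.length = x.length ∧
  st.2.1.length = symbols.length ∧
  st.2.2.length = x.length ∧
  st.1.Perm x ∧
  (∀ k < symbols.length,
    startF x symbols k ≤ st.2.1.getD k 0 ∧ st.2.1.getD k 0 ≤ startF x symbols (k+1)) ∧
  (∀ k < symbols.length, ∀ p, startF x symbols k ≤ p → p < startF x symbols (k+1) →
    st.2.2.getD p false = decide (p < st.2.1.getD k 0)) ∧
  (∀ p < x.length, st.2.2.getD p false = true → st.1.getD p 0 = (FL x symbols).getD p 0)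

theorem block_not_full (x symbols : List Int) (hpre : ∀ v ∈ x, v ∈ symbols)
    (st : List Int × List Nat × List Bool) (hinv : INV x symbols st)
    (i : Nat) (hi : i < x.length) (hfi : st.2.2.getD i false = false) :
    st.2.1.getD (keyF symbols (st.1.getD i 0)) 0
      < startF x symbols (keyF symbols (st.1.getD i 0) + 1) := by
  obtain ⟨hlx, hlii, hlf, hperm, hP1, hP2, hP3⟩ := hinv
  have hsx : st.1.getD i 0 ∈ x := by
    refine hperm.mem_iff.mp ?_
    rw [List.getD_eq_getElem st.1 0 (by omega)]
    exact List.getElem_mem _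
  have hssym : st.1.getD i 0 ∈ symbols := hpre _ hsx
  obtain ⟨hklt, hsymk⟩ := keyF_spec symbols (st.1.getD i 0) hssym
  set k := keyF symbols (st.1.getD i 0) with hk
  set jj := st.2.1.getD k 0 with hjj
  obtain ⟨hge, hle⟩ := hP1 k hklt
  have htop : startF x symbols symbols.length = x.length := startF_top x symbols hpre
  have hk1m : startF x symbols (k+1) ≤ x.length := htop ▸ startF_mono x symbols hklt
  have hcnt : cntF x symbols k = ∑ q ∈ Finset.range x.length,
      if keyF symbols (st.1.getD q 0) == k then 1 else 0 := by
    unfold cntF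
    rw [← hperm.countP_eq, countP_eq_sum _ (0:Int) st.1, hlx]
  have hiIco : i ∉ Finset.Ico (startF x symbols k) jj := by
    intro hmem
    obtain ⟨h1, h2⟩ := Finset.mem_Ico.mp hmem
    have := hP2 k hklt i h1 (by omega)
    rw [hfi] at this
    exact absurd (of_decide_eq_false this.symm) (by omega)
  have hsub : insert i (Finset.Ico (startF x symbols k) jj) ⊆ Finset.range x.length := by
    intro q hq
    rcases Finset.mem_insert.mp hq with hq | hq
    · exact Finset.mem_range.mpr (hq ▸ hi)
    · obtain ⟨_, h2⟩ := Finset.mem_Ico.mp hq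
      exact Finset.mem_range.mpr (by omega)
  have hones : ∀ q ∈ insert i (Finset.Ico (startF x symbols k) jj),
      (if keyF symbols (st.1.getD q 0) == k then (1:ℕ) else 0) = 1 := by
    intro q hq
    rcases Finset.mem_insert.mp hq with hq | hq
    · subst hq; simp [hk]
    · obtain ⟨h1, h2⟩ := Finset.mem_Ico.mp hq
      have hqn : q < x.length := by omega
      have hfq : st.2.2.getD q false = true := by
        rw [hP2 k hklt q h1 (by omega)]
        exact decide_eq_true h2
      have hcpos : 0 < cntF x symbols k := by
        have := startF_succ x symbols k
        omega
      have hFL : (FL x symbols).getD q 0 = symbols.getD k 0 := by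
        have hoff : q - startF x symbols k < cntF x symbols k := by
          have := startF_succ x symbols k
          omega
        have := FL_getD x symbols k hklt (q - startF x symbols k) hoff
        rwa [show startF x symbols k + (q - startF x symbols k) = q by omega] at this
      have : keyF symbols (st.1.getD q 0) = k := by
        rw [hP3 q hqn hfq, hFL]
        exact cnt_pos_key x symbols hpre k hcpos
      rw [this]
      simp
  have hbound : (jj - startF x symbols k) + 1 ≤ cntF x symbols k := by
    have hsumS : ∑ q ∈ insert i (Finset.Ico (startF x symbols k) jj),
        (if keyF symbols (st.1.getD q 0) == k then (1:ℕ) else 0)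
        = (jj - startF x symbols k) + 1 := by
      rw [Finset.sum_congr rfl hones, Finset.sum_const, smul_eq_mul, mul_one,
        Finset.card_insert_of_notMem hiIco, Nat.card_Ico]
    rw [hcnt, ← hsumS]
    exact Finset.sum_le_sum_of_subset hsub
  have := startF_succ x symbols k
  omega

theorem cycle_spec (x symbols : List Int) (hpre : ∀ v ∈ x, v ∈ symbols) :
    ∀ (fuel : Nat) (i : Nat) (st : List Int × List Nat × List Bool),
      INV x symbols st → i < x.length → st.2.2.getD i false = false →
      st.2.2.count false ≤ fuel →
      INV x symbols (cycleA (dictOf symbols) i fuel st) ∧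
      (cycleA (dictOf symbols) i fuel st).2.2.getD i false = true ∧
      (∀ p, st.2.2.getD p false = true →
        (cycleA (dictOf symbols) i fuel st).2.2.getD p false = true) := by
  intro fuel
  induction fuel with
  | zero =>
    intro i st hinv hi hfi hcount
    have := count_false_pos st.2.2 i (by rw [hinv.2.2.1]; exact hi) hfi
    omega
  | succ fuel ih =>
    intro i st hinv hi hfi hcount
    obtain ⟨xs, ii, fixed⟩ := st
    obtain ⟨hlx, hlii, hlf, hperm, hP1, hP2, hP3⟩ := hinv
    dsimp only at hlx hlii hlf hperm hP1 hP2 hP3 hfi hcount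
    have hsx : xs.getD i 0 ∈ x := by
      refine hperm.mem_iff.mp ?_
      rw [List.getD_eq_getElem xs 0 (by omega)]
      exact List.getElem_mem _
    obtain ⟨hklt, hsymk⟩ := keyF_spec symbols (xs.getD i 0) (hpre _ hsx)
    have hfull := block_not_full x symbols hpre (xs, ii, fixed)
      ⟨hlx, hlii, hlf, hperm, hP1, hP2, hP3⟩ i hi hfi
    dsimp only at hfull
    simp only [cycleA]
    rw [keyF_def]
    set kk := keyF symbols (xs.getD i 0) with hkk
    set jj := ii.getD kk 0 with hjjdef
    obtain ⟨hge, hle⟩ := hP1 kk hklt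
    have hssucc := startF_succ x symbols kk
    have htop : startF x symbols symbols.length = x.length := startF_top x symbols hpre
    have hjn : jj < x.length := by
      have := startF_mono x symbols (show kk + 1 ≤ symbols.length from hklt)
      omega
    have hfj : fixed.getD jj false = false := by
      rw [hP2 kk hklt jj hge hfull]
      exact decide_eq_false (lt_irrefl jj)
    have hinv' : INV x symbols (pySwap xs i jj, ii.set kk (jj + 1), fixed.set jj true) := by
      refine ⟨by rw [pySwap_length]; exact hlx, by simpa using hlii, by simpa using hlf,
        (pySwap_perm xs i jj (by omega) (by omega)).trans hperm, ?_, ?_, ?_⟩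
      · intro k' hk'
        rcases eq_or_ne k' kk with hkx | hkx
        · subst hkx
          rw [getD_set_eq _ _ _ _ (by omega)]
          constructor <;> omega
        · rw [getD_set_ne _ _ _ hkx]
          exact hP1 k' hk'
      · intro k' hk' p h1 h2
        rcases eq_or_ne k' kk with hkx | hkx
        · subst hkx
          rw [getD_set_eq _ _ _ _ (by omega)]
          rcases eq_or_ne p jj with hpj | hpj
          · subst hpj
            rw [getD_set_eq _ _ _ _ (by omega)]
            exact (decide_eq_true (by omega)).symm
          · rw [getD_set_ne _ _ _ hpj, hP2 kk hk' p h1 h2]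
            exact decide_eq_decide.mpr (by omega)
        · have hpj : p ≠ jj := by
            rcases Nat.lt_or_ge k' kk with hlt | hgt
            · have := startF_mono x symbols (show k' + 1 ≤ kk from hlt)
              omega
            · have hkk' : kk + 1 ≤ k' := by omega
              have := startF_mono x symbols hkk'
              omega
          rw [getD_set_ne _ _ _ hpj, getD_set_ne _ _ _ hkx]
          exact hP2 k' hk' p h1 h2
      · intro p hp hfp
        rw [pySwap_getD xs i jj p (by omega) (by omega)]
        rcases eq_or_ne p jj with hpj | hpj
        · subst hpj
          rw [if_pos rfl]
          have hcpos : 0 < cntF x symbols kk := by omega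
          have hoff : jj - startF x symbols kk < cntF x symbols kk := by omega
          have hFL := FL_getD x symbols kk hklt (jj - startF x symbols kk) hoff
          rw [show startF x symbols kk + (jj - startF x symbols kk) = jj by omega] at hFL
          rw [hFL, hsymk]
        · rw [if_neg hpj]
          rw [getD_set_ne _ _ _ hpj] at hfp
          rcases eq_or_ne p i with hpi | hpi
          · subst hpi
            rw [hfp] at hfi
            exact absurd hfi (by simp)
          · rw [if_neg hpi]
            exact hP3 p hp hfp
    by_cases hij : i = jj
    · rw [if_pos hij]
      refine ⟨hinv', ?_, ?_⟩
      · rw [hij]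
        exact getD_set_eq _ _ _ _ (by omega)
      · intro p hp
        exact getD_set_true_mono _ _ _ hp
    · rw [if_neg hij]
      have hfi' : (fixed.set jj true).getD i false = false := by
        rw [getD_set_ne _ _ _ hij]
        exact hfi
      have hcount' : (fixed.set jj true).count false ≤ fuel := by
        have := count_false_set fixed jj (by omega) hfj
        omega
      obtain ⟨h1, h2, h3⟩ := ih i (pySwap xs i jj, ii.set kk (jj + 1), fixed.set jj true)
        hinv' hi hfi' hcount'
      exact ⟨h1, h2, fun p hp => h3 p (getD_set_true_mono _ _ _ hp)⟩

theorem outer_spec (x symbols : List Int) (hpre : ∀ v ∈ x, v ∈ symbols) :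
    ∀ (is : List Nat) (st : List Int × List Nat × List Bool),
      INV x symbols st → (∀ i ∈ is, i < x.length) →
      INV x symbols (is.foldl (fun st i =>
        if st.2.2.getD i false = false then cycleA (dictOf symbols) i (x.length+1) st else st) st) ∧
      (∀ p, st.2.2.getD p false = true →
        (is.foldl (fun st i =>
          if st.2.2.getD i false = false then cycleA (dictOf symbols) i (x.length+1) st else st)
            st).2.2.getD p false = true) ∧
      (∀ i ∈ is,
        (is.foldl (fun st i =>
          if st.2.2.getD i false = false then cycleA (dictOf symbols) i (x.length+1) st else st)
            st).2.2.getD i false = true) := by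
  intro is
  induction is with
  | nil =>
    intro st hinv _
    exact ⟨hinv, fun p h => h, by intro i hi; simp at hi⟩
  | cons i is ih =>
    intro st hinv hmem
    have hi : i < x.length := hmem i List.mem_cons_self
    simp only [List.foldl_cons]
    by_cases h : st.2.2.getD i false = false
    · rw [if_pos h]
      obtain ⟨hinv1, hfix1, hmono1⟩ := cycle_spec x symbols hpre (x.length+1) i st hinv hi h
        (by have h1 := List.count_le_length (a := false) (l := st.2.2)
            have h2 := hinv.2.2.1
            omega)
      obtain ⟨hinv2, hmono2, hall⟩ := ih _ hinv1 (fun j hj => hmem j (List.mem_cons_of_mem i hj))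
      refine ⟨hinv2, fun p hp => hmono2 p (hmono1 p hp), ?_⟩
      intro j hj
      rcases List.mem_cons.mp hj with rfl | hj
      · exact hmono2 _ hfix1
      · exact hall j hj
    · rw [if_neg h]
      have htrue : st.2.2.getD i false = true := by
        cases hb : st.2.2.getD i false
        · exact absurd hb h
        · rfl
      obtain ⟨hinv2, hmono2, hall⟩ := ih st hinv (fun j hj => hmem j (List.mem_cons_of_mem i hj))
      refine ⟨hinv2, hmono2, ?_⟩
      intro j hj
      rcases List.mem_cons.mp hj with rfl | hj
      · exact hmono2 _ htrue
      · exact hall j hj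

-- ---- the initial state ----
def histB (x symbols : List Int) : List Nat :=
  x.foldl
    (fun (h : List Nat) v =>
      h.set (((dictOf symbols).get? v).getD 0) (h.getD (((dictOf symbols).get? v).getD 0) 0 + 1))
    (List.replicate symbols.length 0)

theorem histB_def (x symbols : List Int) : histB x symbols =
    x.foldl
      (fun (h : List Nat) v =>
        h.set (((dictOf symbols).get? v).getD 0) (h.getD (((dictOf symbols).get? v).getD 0) 0 + 1))
      (List.replicate symbols.length 0) := rfl

theorem histB_getD (x symbols : List Int) (hpre : ∀ v ∈ x, v ∈ symbols) :
    ∀ k < symbols.length, (histB x symbols).getD k 0 = cntF x symbols k := by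
  intro k hk
  have hkeys : ∀ v ∈ x, keyF symbols v < (List.replicate symbols.length (0:Nat)).length := by
    intro v hv; simpa using (keyF_spec symbols v (hpre v hv)).1
  rw [histB_def, (hist_fold symbols x (List.replicate symbols.length 0) hkeys).2 k,
    getD_replicate _ _ _ _ hk, Nat.zero_add]
  rfl

theorem buildA_eq (symbols : List Int) :
    buildA symbols = (dictOf symbols,
      List.replicate symbols.length 0, List.replicate symbols.length 0) := by
  unfold buildA dictOf
  induction symbols.length with
  | zero => rfl
  | succ M ih =>
    rw [List.range_succ, List.foldl_append, List.foldl_append, ih]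
    simp [List.replicate_succ']

theorem countA_aux (d : PySem.Dict Int Nat) :
    ∀ (l : List Int) (h0 : List Nat) (f0 : List Bool),
      l.foldl (fun (st : List Nat × List Bool) v =>
        (st.1.set ((d.get? v).getD 0) (st.1.getD ((d.get? v).getD 0) 0 + 1), st.2 ++ [false]))
        (h0, f0)
      = (l.foldl (fun (h : List Nat) v =>
          h.set ((d.get? v).getD 0) (h.getD ((d.get? v).getD 0) 0 + 1)) h0,
         f0 ++ List.replicate l.length false) := by
  intro l
  induction l with
  | nil => intro h0 f0; simp
  | cons v l ih =>
    intro h0 f0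
    simp only [List.foldl_cons]
    rw [ih]
    simp [List.replicate_succ]

theorem countA_eq (x symbols : List Int) :
    countA (dictOf symbols) (List.replicate symbols.length 0) x
      = (histB x symbols, List.replicate x.length false) := by
  unfold countA
  rw [countA_aux (dictOf symbols) x (List.replicate symbols.length 0) [], List.nil_append]
  rfl

theorem prefix_spec (x symbols : List Int) (hist : List Nat)
    (hh : ∀ k < symbols.length, hist.getD k 0 = cntF x symbols k) :
    ∀ c < symbols.length,
      ((List.range' 1 c).foldl (fun ii i => ii.set i (hist.getD (i-1) 0 + ii.getD (i-1) 0))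
        (List.replicate symbols.length 0)).length = symbols.length ∧
      ∀ k < symbols.length,
        ((List.range' 1 c).foldl (fun ii i => ii.set i (hist.getD (i-1) 0 + ii.getD (i-1) 0))
          (List.replicate symbols.length 0)).getD k 0
        = if k ≤ c then startF x symbols k else 0 := by
  intro c
  induction c with
  | zero =>
    intro _
    refine ⟨by simp, ?_⟩
    intro k hk
    simp only [List.range'_zero, List.foldl_nil]
    rcases Nat.eq_zero_or_pos k with rfl | hkpos
    · rw [getD_replicate _ _ _ _ hk]
      simp [startF]
    · rw [getD_replicate _ _ _ _ hk]
      rw [if_neg (by omega)]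
  | succ c ih =>
    intro hc
    obtain ⟨hlen, hget⟩ := ih (by omega)
    have hconcat : List.range' 1 (c+1) = List.range' 1 c ++ [1 + 1*c] := List.range'_concat ..
    rw [show (1 + 1*c) = c + 1 by omega] at hconcat
    rw [hconcat, List.foldl_append]
    simp only [List.foldl_cons, List.foldl_nil]
    rw [show c + 1 - 1 = c by omega]
    refine ⟨by simpa using hlen, ?_⟩
    intro k hk
    rcases eq_or_ne k (c+1) with rfl | hkc
    · rw [getD_set_eq _ _ _ _ (by omega), if_pos (by omega)]
      rw [hget c (by omega), if_pos (by omega), hh c (by omega), startF_succ]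
      omega
    · rw [getD_set_ne _ _ _ hkc, hget k hk]
      rcases Nat.lt_or_ge c k with hkgt | hkle
      · rw [if_neg (by omega), if_neg (by omega)]
      · rw [if_pos hkle, if_pos (by omega)]

theorem initial_INV (x symbols : List Int) (hsym : symbols ≠ [])
    (hpre : ∀ v ∈ x, v ∈ symbols) :
    INV x symbols (x, prefixA (histB x symbols)
      (List.replicate symbols.length 0) symbols.length,
      List.replicate x.length false) := by
  have hm : 0 < symbols.length := List.length_pos_of_ne_nil hsym
  obtain ⟨hplen, hpget⟩ := prefix_spec x symbols (histB x symbols)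
    (histB_getD x symbols hpre) (symbols.length - 1) (by omega)
  unfold prefixA
  refine ⟨rfl, hplen, by simp, List.Perm.refl x, ?_, ?_, ?_⟩
  · intro k hk
    rw [hpget k hk, if_pos (by omega)]
    have := startF_succ x symbols k
    omega
  · intro k hk p h1 h2
    rw [getD_replicate_any, hpget k hk, if_pos (by omega)]
    exact (decide_eq_false (by omega)).symm
  · intro p hp hf
    rw [getD_replicate_any] at hf
    exact absurd hf (by simp)

theorem portA_eq (x symbols : List Int) (hsym : symbols ≠ []) (hpre : ∀ v ∈ x, v ∈ symbols) :
    order_symbols x symbols = FL x symbols := by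
  simp only [order_symbols]
  rw [buildA_eq]
  dsimp only
  rw [countA_eq]
  dsimp only
  unfold placeA
  obtain ⟨hinvF, _, hallF⟩ := outer_spec x symbols hpre (List.range x.length)
    (x, prefixA (histB x symbols) (List.replicate symbols.length 0) symbols.length,
      List.replicate x.length false)
    (initial_INV x symbols hsym hpre) (fun i hi => List.mem_range.mp hi)
  obtain ⟨hlx, _, _, _, _, _, h7⟩ := hinvF
  apply List.ext_getElem
  · rw [hlx, FL_length x symbols hpre]
  · intro p h1 h2
    have hp : p < x.length := by rwa [hlx] at h1
    have := h7 p hp (hallF p (List.mem_range.mpr hp))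
    rwa [List.getD_eq_getElem _ 0 h1, List.getD_eq_getElem _ 0 h2] at this

-- ===== VERDICT (by name: the statement is the Claim_ definition above) =====
theorem order_symbols_spec : Claim_equal_order_symbols := by
  intro x symbols _ hpre
  unfold Spec_order_symbols
  rw [portA_eq x symbols hpre.1 hpre.2, altB_eq x symbols hpre.2]
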